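-- pv_equiv track=rewrite | github.com/macuartin/coding-challenges | coderbyte/question_marks.py | QuestionMarks
-- ===== SOURCE A (Python) =====
-- def QuestionMarks(s):
--     q_count = 0
--     first_num = 0
--     band = False
--     for ch in s:
--         if ch.isdigit():
--             if first_num + int(ch) == 10:
--                 if q_count == 3:
--                     band = True
--             first_num = int(ch)
--             q_count = 0
--         elif ch == '?':
--             q_count += 1
--     return band
-- ===== SOURCE B (Python) =====
-- def QuestionMarks(s):
--     # Filter to the only characters that matter (digits and '?'), then scan the
--     # token list pairwise: between consecutive digits every token is a '?', so the
--     # gap length IS the question-mark count.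
--     t = [c for c in s if c.isdigit() or c == '?']
--     # drop question marks before the first digit
--     i = 0
--     while i < len(t) and t[i] == '?':
--         i += 1
--     t = t[i:]
--     while t:
--         d1, rest = t[0], t[1:]
--         k = 0
--         while k < len(rest) and rest[k] == '?':
--             k += 1
--         if k == len(rest):
--             return False
--         if int(d1) + int(rest[k]) == 10 and k == 3:
--             return True
--         t = rest[k:]
--     return False
-- ===== Notes on version B (the rewrite author's own statement) =====
-- stated objective: alternative
-- what changed: Replaces A's stateful single sweep over all characters (q_count/first_num/band flags, no early exit) with a filter to the relevant tokens (digits and '?') followed by a pairwise gap scan over that token list with early return.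
import Mathlib
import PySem

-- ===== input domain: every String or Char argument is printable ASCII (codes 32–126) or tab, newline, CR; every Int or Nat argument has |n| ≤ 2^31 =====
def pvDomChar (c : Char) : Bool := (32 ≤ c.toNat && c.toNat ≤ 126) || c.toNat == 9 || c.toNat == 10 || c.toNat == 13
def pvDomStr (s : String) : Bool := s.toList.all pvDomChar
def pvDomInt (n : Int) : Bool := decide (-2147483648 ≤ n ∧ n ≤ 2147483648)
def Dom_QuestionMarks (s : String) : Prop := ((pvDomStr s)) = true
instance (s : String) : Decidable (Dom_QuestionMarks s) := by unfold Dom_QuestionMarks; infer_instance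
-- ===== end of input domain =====

-- B replaces A's stateful single sweep (q_count/first_num/band) by a filter to the
-- relevant tokens (digits and '?') followed by a pairwise gap scan with early return
-- (objective: alternative decomposition, same O(n) cost).

-- int(ch) for a digit character ch (exact for ASCII digits, which is all Dom_ admits)
def pyDigitInt (c : Char) : Int := (c.toNat : Int) - 48

-- ===== PORT A =====
-- the body of A's for-loop, as a fold step over the state (q_count, first_num, band)
def qmStep (st : Int × Int × Bool) (ch : Char) : Int × Int × Bool :=
  if PySem.Chars.isdigit ch then
    ((0 : Int), pyDigitInt ch,
      if st.2.1 + pyDigitInt ch = 10 then (if st.1 = 3 then true else st.2.2) else st.2.2)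
  else if ch = '?' then (st.1 + 1, st.2.1, st.2.2)
  else st

def QuestionMarks (s : String) : Bool :=
  (s.toList.foldl qmStep ((0 : Int), (0 : Int), false)).2.2

-- ===== PORT B =====
-- the 'while k < len(rest) and rest[k] == "?"' counting loop of Source B
def altCountQ : List Char → Nat
  | [] => 0
  | c :: t => if c = '?' then altCountQ t + 1 else 0

-- the main 'while t:' loop of Source B
def altGo : List Char → Bool
  | [] => false
  | _d1 :: rest =>
    let k := altCountQ rest
    match rest.drop k with
    | [] => false
    | d2 :: _ =>
      if pyDigitInt _d1 + pyDigitInt d2 = 10 ∧ k = 3 then true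
      else altGo (rest.drop k)
termination_by t => t.length
decreasing_by simp only [List.length_drop, List.length_cons]; omega

def QuestionMarks_alt (s : String) : Bool :=
  let t := s.toList.filter (fun c => PySem.Chars.isdigit c || decide (c = '?'))
  altGo (t.drop (altCountQ t))

-- ===== PRECONDITION & SPEC =====
def Spec_QuestionMarks (s : String) (out : Bool) : Prop := out = QuestionMarks_alt s
instance (s : String) (out : Bool) : Decidable (Spec_QuestionMarks s out) := by unfold Spec_QuestionMarks; infer_instance

-- ===== CLAIM (what is proved, stated in full; the proofs are below) =====
def Claim_equal_QuestionMarks : Prop := ∀ (s : String), Dom_QuestionMarks s → Spec_QuestionMarks s (QuestionMarks s)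

-- ===== LEMMAS AND PROOFS =====

-- proof-side characterisation of A's sweep: qmC f q t = "some later consecutive digit
-- pair (starting from last digit f with q '?' already seen) sums to 10 across exactly 3 '?'"
def qmC (f q : Int) : List Char → Bool
  | [] => false
  | c :: t =>
    if PySem.Chars.isdigit c then
      (decide (f + pyDigitInt c = 10) && decide (q = 3)) || qmC (pyDigitInt c) 0 t
    else if c = '?' then qmC f (q + 1) t
    else qmC f q t

theorem digit_bounds (c : Char) (h : PySem.Chars.isdigit c = true) :
    48 ≤ c.toNat ∧ c.toNat ≤ 57 := by
  unfold PySem.Chars.isdigit at h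
  simp only [Bool.and_eq_true, decide_eq_true_eq, Char.le_def, UInt32.le_iff_toNat_le] at h
  simp only [Char.toNat]
  exact h

theorem foldA_eq_qmC (t : List Char) : ∀ (q f : Int) (b : Bool),
    (t.foldl qmStep (q, f, b)).2.2 = (b || qmC f q t) := by
  induction t with
  | nil => intro q f b; simp [qmC]
  | cons c t ih =>
    intro q f b
    simp only [List.foldl_cons, qmStep, qmC]
    by_cases hd : PySem.Chars.isdigit c
    · simp only [hd, if_true, ih]
      split_ifs <;> simp_all
    · simp only [hd, if_false, Bool.false_eq_true]
      by_cases hq : c = '?' <;> simp [hq, ih]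

theorem qmC_filter (t : List Char) : ∀ (f q : Int),
    qmC f q t = qmC f q (t.filter (fun c => PySem.Chars.isdigit c || decide (c = '?'))) := by
  induction t with
  | nil => intro f q; simp
  | cons c t ih =>
    intro f q
    by_cases hd : PySem.Chars.isdigit c
    · simp [qmC, hd, ih]
    · by_cases hq : c = '?' <;> simp [qmC, hd, hq, ih]

theorem qmC_qprefix (t : List Char) : ∀ (f q : Int),
    (∀ c ∈ t, (PySem.Chars.isdigit c || decide (c = '?')) = true) →
    qmC f q t = (match t.drop (altCountQ t) with
      | [] => false
      | d2 :: r2 =>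
        (decide (f + pyDigitInt d2 = 10) && decide (q + (altCountQ t : Int) = 3))
          || qmC (pyDigitInt d2) 0 r2) := by
  induction t with
  | nil => intro f q _; simp [qmC, altCountQ]
  | cons c t ih =>
    intro f q htok
    by_cases hq : c = '?'
    · subst hq
      have hd : PySem.Chars.isdigit '?' = false := by decide
      have hcount : altCountQ ('?' :: t) = altCountQ t + 1 := by simp [altCountQ]
      have hdrop : ('?' :: t).drop (altCountQ ('?' :: t)) = t.drop (altCountQ t) := by
        simp [hcount]
      rw [hdrop]
      have lhs : qmC f q ('?' :: t) = qmC f (q + 1) t := by simp [qmC, hd]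
      rw [lhs, ih f (q + 1) (fun c hc => htok c (List.mem_cons_of_mem _ hc))]
      cases hdt : t.drop (altCountQ t) with
      | nil => simp
      | cons d2 r2 =>
        have : decide (q + 1 + (altCountQ t : Int) = 3)
            = decide (q + (altCountQ ('?' :: t) : Int) = 3) := by
          simp only [decide_eq_decide, hcount]
          push_cast
          omega
        simp [this]
    · have hd : PySem.Chars.isdigit c = true := by
        have := htok c (List.mem_cons_self ..)
        simpa [hq] using this
      have hcount : altCountQ (c :: t) = 0 := by simp [altCountQ, hq]
      rw [hcount]
      simp [qmC, hd]

theorem altGo_eq_qmC (n : Nat) : ∀ (t : List Char), t.length ≤ n →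
    (∀ c ∈ t, (PySem.Chars.isdigit c || decide (c = '?')) = true) →
    ∀ d rest, t = d :: rest → altGo t = qmC (pyDigitInt d) 0 rest := by
  induction n with
  | zero =>
    intro t ht _ d rest h
    subst h; simp at ht
  | succ n ih =>
    intro t ht htok d rest h
    subst h
    rw [altGo, qmC_qprefix rest (pyDigitInt d) 0
      (fun c hc => htok c (List.mem_cons_of_mem _ hc))]
    cases hdrop : rest.drop (altCountQ rest) with
    | nil => rfl
    | cons d2 r2 =>
      have hrec : altGo (rest.drop (altCountQ rest)) = qmC (pyDigitInt d2) 0 r2 := by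
        refine ih (rest.drop (altCountQ rest)) ?_ ?_ d2 r2 hdrop
        · simp only [List.length_drop]
          simp only [List.length_cons] at ht
          omega
        · exact fun c hc =>
            htok c (List.mem_cons_of_mem _ (List.mem_of_mem_drop hc))
      rw [hdrop] at hrec
      simp only [hrec]
      split_ifs with h
      · simp [h.1, h.2]
      · have h2 : ((altCountQ rest : Int) = 3) ↔ (altCountQ rest = 3) := by omega
        rcases Decidable.not_and_iff_not_or_not.mp h with h1 | h1
        · simp [h1]
        · simp [h2, h1]

theorem head_drop_ne_q (t : List Char) :
    ∀ d r, t.drop (altCountQ t) = d :: r → d ≠ '?' := by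
  induction t with
  | nil => intro d r h; simp at h
  | cons c t ih =>
    intro d r h
    by_cases hq : c = '?'
    · subst hq
      simp only [altCountQ, if_true, List.drop_succ_cons] at h
      exact ih d r h
    · simp only [altCountQ, hq, if_false, List.drop_zero, List.cons.injEq] at h
      exact h.1 ▸ hq

-- ===== VERDICT (by name: the statement is the Claim_ definition above) =====
theorem QuestionMarks_spec : Claim_equal_QuestionMarks := by
  intro s _
  unfold Spec_QuestionMarks QuestionMarks QuestionMarks_alt
  rw [foldA_eq_qmC, Bool.false_or]
  set t0 := s.toList.filter (fun c => PySem.Chars.isdigit c || decide (c = '?')) with ht0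
  have htok : ∀ c ∈ t0, (PySem.Chars.isdigit c || decide (c = '?')) = true := by
    intro c hc
    rw [ht0] at hc
    exact (List.mem_filter.mp hc).2
  have htok' : ∀ c ∈ t0.drop (altCountQ t0),
      (PySem.Chars.isdigit c || decide (c = '?')) = true :=
    fun c hc => htok c (List.mem_of_mem_drop hc)
  rw [qmC_filter, ← ht0, qmC_qprefix t0 0 0 htok]
  cases hdt : t0.drop (altCountQ t0) with
  | nil => simp only [hdt]; rw [altGo]
  | cons d r =>
    rw [altGo_eq_qmC (t0.drop (altCountQ t0)).length (t0.drop (altCountQ t0))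
      le_rfl htok' d r hdt]
    have hdq : d ≠ '?' := head_drop_ne_q t0 d r hdt
    have hd : PySem.Chars.isdigit d = true := by
      have := htok d (List.mem_of_mem_drop (hdt ▸ List.mem_cons_self ..))
      simpa [hdq] using this
    have hb := digit_bounds d hd
    have hne : pyDigitInt d ≠ 10 := by unfold pyDigitInt; omega
    simp [hne]
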